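-- pv_equiv track=rewrite | github.com/pjot/advent-of-code | 2025/02/02.py | invalid_two
-- ===== SOURCE A (Python) =====
-- def invalid_two(n: int) -> bool:
--     s = str(n)
--     l = len(s)
--
--     for part in range(1, l // 2 + 1):
--         if l % part != 0:
--             continue
--
--         repeat = l // part
--         section = s[:part]
--         if s == section * repeat:
--             return True
--     return False
-- ===== SOURCE B (Python) =====
-- def invalid_two(n: int) -> bool:
--     s = str(n)
--     return s in (s + s)[1:-1]
-- ===== Notes on version B (the rewrite author's own statement) =====
-- stated objective: idiomatic
-- what changed: Replaces the divisor-enumeration loop with the standard doubling trick: s is a repetition of a shorter block iff s occurs in (s+s)[1:-1], a single substring containment test.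
import Mathlib
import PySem

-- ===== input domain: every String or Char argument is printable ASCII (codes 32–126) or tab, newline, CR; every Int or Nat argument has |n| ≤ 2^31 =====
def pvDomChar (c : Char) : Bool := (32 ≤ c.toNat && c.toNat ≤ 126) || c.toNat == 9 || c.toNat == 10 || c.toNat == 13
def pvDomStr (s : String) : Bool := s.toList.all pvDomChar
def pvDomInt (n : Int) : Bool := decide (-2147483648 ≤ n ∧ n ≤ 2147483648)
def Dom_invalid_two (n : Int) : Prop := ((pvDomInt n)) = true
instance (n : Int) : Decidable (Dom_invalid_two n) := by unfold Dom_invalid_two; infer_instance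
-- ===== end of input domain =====

-- B replaces A's divisor-enumeration loop by the standard doubling trick (s is a repetition of a shorter block iff s occurs in (s+s)[1:-1]); same results, more idiomatic.


-- ===== PORT A =====
-- the 'for part in range(1, l // 2 + 1)' loop with its early 'return True'
def invalidTwoLoop (s : List Char) (l : Int) : List Int → Bool
  | [] => false
  | part :: rest =>
    if PySem.Int.mod l part ≠ 0 then invalidTwoLoop s l rest
    else if s = PySem.List.pyRepeat (PySem.List.slice s none (some part)) (PySem.Int.floordiv l part)
    then true
    else invalidTwoLoop s l rest

def invalid_two (n : Int) : Bool :=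
  let s := PySem.Int.toChars n
  let l := PySem.Chars.len s
  invalidTwoLoop s l (PySem.List.pyRange 1 (PySem.Int.floordiv l 2 + 1) 1)

-- ===== PORT B =====
-- B: s = str(n); return s in (s + s)[1:-1]
def invalid_two_alt (n : Int) : Bool :=
  let s := PySem.Int.toChars n
  PySem.Chars.isIn s (PySem.List.slice (s ++ s) (some 1) (some (-1)))

-- ===== PRECONDITION & SPEC =====
def Spec_invalid_two (n : Int) (out : Bool) : Prop := out = invalid_two_alt n
instance (n : Int) (out : Bool) : Decidable (Spec_invalid_two n out) := by unfold Spec_invalid_two; infer_instance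

-- ===== CLAIM (what is proved, stated in full; the proofs are below) =====
def Claim_equal_invalid_two : Prop := ∀ (n : Int), Dom_invalid_two n → Spec_invalid_two n (invalid_two n)

-- ===== LEMMAS AND PROOFS =====

-- Nat.toDigitsCore never shortens its accumulator
theorem toDigitsCore_len_ge (b : ℕ) : ∀ (f n : ℕ) (acc : List Char),
    acc.length ≤ (Nat.toDigitsCore b f n acc).length := by
  intro f
  induction f with
  | zero => intro n acc; simp [Nat.toDigitsCore]
  | succ f ih =>
    intro n acc
    simp only [Nat.toDigitsCore]
    split
    · simp
    · exact le_trans (by simp) (ih (n / b) (Nat.digitChar (n % b) :: acc))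

-- str(n) is never the empty string
theorem toChars_ne_nil (n : Int) : PySem.Int.toChars n ≠ [] := by
  have h : ∀ m : ℕ, Nat.toDigits 10 m ≠ [] := by
    intro m
    unfold Nat.toDigits
    intro hnil
    have h1 : (Nat.toDigitsCore 10 (m+1) m []).length = 0 := by rw [hnil]; rfl
    simp only [Nat.toDigitsCore] at h1
    revert h1
    split
    · simp
    · intro h1
      have h2 := toDigitsCore_len_ge 10 m (m / 10) (Nat.digitChar (m % 10) :: [])
      rw [h1] at h2
      simp at h2
  unfold PySem.Int.toChars
  split
  · simp
  · exact h _

-- the loop returns true iff some listed part works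
theorem invalidTwoLoop_iff (s : List Char) (l : Int) (parts : List Int) :
    invalidTwoLoop s l parts = true ↔
      ∃ p ∈ parts, PySem.Int.mod l p = 0 ∧
        s = PySem.List.pyRepeat (PySem.List.slice s none (some p)) (PySem.Int.floordiv l p) := by
  induction parts with
  | nil => simp [invalidTwoLoop]
  | cons part rest ih =>
    simp only [invalidTwoLoop]
    split
    · rename_i hmod
      rw [ih]
      constructor
      · rintro ⟨p, hp, h⟩; exact ⟨p, List.mem_cons_of_mem _ hp, h⟩
      · rintro ⟨p, hp, h⟩
        rcases List.mem_cons.mp hp with rfl | hp'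
        · exact absurd h.1 hmod
        · exact ⟨p, hp', h⟩
    · rename_i hmod
      push_neg at hmod
      split
      · rename_i heq
        simp only [true_iff]
        exact ⟨part, List.mem_cons_self, hmod, heq⟩
      · rename_i hne
        rw [ih]
        constructor
        · rintro ⟨p, hp, h⟩; exact ⟨p, List.mem_cons_of_mem _ hp, h⟩
        · rintro ⟨p, hp, h⟩
          rcases List.mem_cons.mp hp with rfl | hp'
          · exact absurd h.2 hne
          · exact ⟨p, hp', h⟩

-- Python floor division of nat casts is Nat division
theorem floordiv_natCast (a b : ℕ) : PySem.Int.floordiv (a : ℤ) (b : ℤ) = ((a / b : ℕ) : ℤ) := by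
  simp [PySem.Int.floordiv, Int.fdiv_eq_ediv]

theorem floordiv_two_natCast (a : ℕ) : PySem.Int.floordiv (a : ℤ) 2 = ((a / 2 : ℕ) : ℤ) := by
  simpa using floordiv_natCast a 2

-- A in arithmetic form: some block length q with at least two repetitions
theorem portA_iff (s : List Char) (hs : s ≠ []) :
    invalidTwoLoop s (s.length : Int)
        (PySem.List.pyRange 1 (PySem.Int.floordiv (s.length : Int) 2 + 1) 1) = true ↔
      ∃ q m : ℕ, 0 < q ∧ 2 ≤ m ∧ s.length = q * m ∧
        s = (List.replicate m (s.take q)).flatten := by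
  rw [invalidTwoLoop_iff]
  constructor
  · rintro ⟨p, hp, hmod, hrep⟩
    rw [PySem.List.mem_pyRange_iff_of_pos (by norm_num)] at hp
    obtain ⟨hp1, hp2, -⟩ := hp
    have hq : ∃ q : ℕ, p = (q : ℤ) := ⟨p.toNat, by omega⟩
    obtain ⟨q, rfl⟩ := hq
    have hq1 : 1 ≤ q := by exact_mod_cast hp1
    have hdvd : q ∣ s.length := by
      rw [PySem.Int.mod_eq_zero_iff_dvd] at hmod
      exact_mod_cast hmod
    have hq2 : q ≤ s.length / 2 := by
      rw [floordiv_two_natCast] at hp2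
      omega
    refine ⟨q, s.length / q, hq1, ?_, (Nat.mul_div_cancel' hdvd).symm, ?_⟩
    · obtain ⟨m, hm⟩ := hdvd
      have h2q : q * 2 ≤ s.length := (Nat.le_div_iff_mul_le (by norm_num)).mp hq2
      have : s.length / q = m := by rw [hm]; exact Nat.mul_div_cancel_left m hq1
      rw [this]
      nlinarith
    · have hform : PySem.List.pyRepeat (PySem.List.slice s none (some (q:ℤ)))
          (PySem.Int.floordiv (s.length : ℤ) (q:ℤ)) = (List.replicate (s.length / q) (s.take q)).flatten := by
        rw [floordiv_natCast, PySem.List.slice_to_natCast]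
        simp only [PySem.List.pyRepeat, Int.toNat_natCast]
      rw [hform] at hrep
      exact hrep
  · rintro ⟨q, m, hq, hm, hlen, hrep⟩
    refine ⟨(q : ℤ), ?_, ?_, ?_⟩
    · rw [PySem.List.mem_pyRange_iff_of_pos (by norm_num)]
      refine ⟨by exact_mod_cast hq, ?_, by simp⟩
      rw [floordiv_two_natCast]
      have : q ≤ s.length / 2 := by
        apply (Nat.le_div_iff_mul_le (by norm_num)).mpr
        nlinarith
      omega
    · rw [PySem.Int.mod_eq_zero_iff_dvd]
      exact_mod_cast Dvd.intro m hlen.symm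
    · have hform : PySem.List.pyRepeat (PySem.List.slice s none (some (q:ℤ)))
          (PySem.Int.floordiv (s.length : ℤ) (q:ℤ)) = (List.replicate (s.length / q) (s.take q)).flatten := by
        rw [floordiv_natCast, PySem.List.slice_to_natCast]
        simp only [PySem.List.pyRepeat, Int.toNat_natCast]
      rw [hform]
      have hdq : s.length / q = m := by rw [hlen]; exact Nat.mul_div_cancel_left m hq
      rw [hdq]
      exact hrep

-- a rotation-fixed list is fixed by all multiples of the rotation
theorem rotate_mul_eq_self {s : List Char} {k : ℕ} (h : s.rotate k = s) (j : ℕ) :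
    s.rotate (j * k) = s := by
  induction j with
  | zero => simp
  | succ j ih =>
    have h2 : s.rotate (j * k + k) = (s.rotate (j * k)).rotate k := (List.rotate_rotate s (j*k) k).symm
    rw [Nat.succ_mul, h2, ih, h]

-- (s ++ s)[1:-1] computed
theorem sliceB_eq (s : List Char) (hs : s ≠ []) :
    PySem.List.slice (s ++ s) (some 1) (some (-1)) =
      (List.drop 1 (s ++ s)).take (2 * s.length - 2) := by
  have hl : 1 ≤ s.length := List.length_pos_iff.mpr hs
  simp only [PySem.List.slice, PySem.List.clampIdx, List.length_append]
  norm_num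
  rw [if_neg (by omega), min_eq_left (by omega)]
  congr 1
  all_goals first | omega | simp

-- B in rotation form: some nontrivial rotation fixes s
theorem portB_iff (s : List Char) (hs : s ≠ []) :
    PySem.Chars.isIn s (PySem.List.slice (s ++ s) (some 1) (some (-1))) = true ↔
      ∃ k : ℕ, 1 ≤ k ∧ k < s.length ∧ s.rotate k = s := by
  have hl : 1 ≤ s.length := List.length_pos_iff.mpr hs
  rw [sliceB_eq s hs, PySem.Chars.isIn_iff_infix]
  constructor
  · rintro ⟨u, v, huv⟩
    have hlens : u.length + s.length + v.length = 2 * s.length - 2 := by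
      have h := congrArg List.length huv
      simp at h
      omega
    refine ⟨u.length + 1, by omega, by omega, ?_⟩
    have hocc : s ++ v = ((List.drop 1 (s ++ s)).take (2 * s.length - 2)).drop u.length := by
      rw [← huv, List.append_assoc, List.drop_left']
      rfl
    have hocc2 : s ++ v = ((s ++ s).drop (u.length + 1)).take (2 * s.length - 2 - u.length) := by
      rw [hocc, List.drop_take, List.drop_drop, Nat.add_comm 1 u.length]
    have htake : s = ((s ++ s).drop (u.length + 1)).take s.length := by
      have h := congrArg (List.take s.length) hocc2
      rw [List.take_left' rfl, List.take_take, min_eq_left (by omega)] at h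
      exact h
    have hcomp : ((s ++ s).drop (u.length + 1)).take s.length
        = s.drop (u.length + 1) ++ s.take (u.length + 1) := by
      rw [List.drop_append_of_le_length (by omega), List.take_append,
        List.take_of_length_le (by simp)]
      congr 1
      have h3 : s.length - (s.drop (u.length + 1)).length = u.length + 1 := by
        simp
        omega
      rw [h3]
    rw [List.rotate_eq_drop_append_take (by omega : u.length + 1 ≤ s.length), ← hcomp]
    exact htake.symm
  · rintro ⟨k, hk1, hkl, hrot⟩
    have hsplit : s.take k ++ s.drop k = s := List.take_append_drop k s
    have hrot' : s.drop k ++ s.take k = s := by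
      rw [← List.rotate_eq_drop_append_take (by omega : k ≤ s.length), hrot]
    have hd : s ++ s = s.take k ++ (s ++ s.drop k) := by
      calc s ++ s = (s.take k ++ s.drop k) ++ (s.take k ++ s.drop k) := by rw [hsplit]
        _ = s.take k ++ ((s.drop k ++ s.take k) ++ s.drop k) := by
            simp only [List.append_assoc]
        _ = s.take k ++ (s ++ s.drop k) := by rw [hrot']
    have hu : (s.take k).length = k := by simp; omega
    have hdrop1 : List.drop 1 (s ++ s) = (s.take k).drop 1 ++ (s ++ s.drop k) := by
      rw [hd, List.drop_append_of_le_length (by omega)]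
    have hulen : ((s.take k).drop 1).length = k - 1 := by simp; omega
    have t1 : ((s.take k).drop 1).take (2 * s.length - 2) = (s.take k).drop 1 :=
      List.take_of_length_le (by rw [hulen]; omega)
    have t2 : s.take (2 * s.length - 2 - (k - 1)) = s := List.take_of_length_le (by omega)
    have htk : (List.drop 1 (s ++ s)).take (2 * s.length - 2) =
        ((s.take k).drop 1 ++ s) ++ (s.drop k).take (2 * s.length - 2 - (k - 1) - s.length) := by
      rw [hdrop1, List.take_append, t1, hulen, List.take_append, t2, List.append_assoc]
    rw [htk]
    exact List.infix_append _ _ _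

-- a p-rotation-fixed list of length p*m is m copies of its first p elements
theorem periodic_of_rotate (p : ℕ) :
    ∀ (m : ℕ) (s : List Char), s.length = p * m → s.rotate p = s →
      s = (List.replicate m (s.take p)).flatten := by
  intro m
  induction m with
  | zero =>
    intro s hlen _
    simp only [Nat.mul_zero, List.length_eq_zero_iff] at hlen
    simp [hlen]
  | succ m ih =>
    intro s hlen hrot
    have hpl : p ≤ s.length := by rw [hlen]; nlinarith
    have hw : (s.take p).length = p := by simp [hpl]
    have ht : (s.drop p).length = p * m := by
      rw [List.length_drop, hlen, Nat.mul_succ]; omega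
    have hsplit : s.take p ++ s.drop p = s := List.take_append_drop p s
    have hcomm : s.drop p ++ s.take p = s.take p ++ s.drop p := by
      rw [hsplit, ← List.rotate_eq_drop_append_take hpl, hrot]
    have hrt : (s.drop p).rotate p = s.drop p := by
      by_cases hm : m = 0
      · have : s.drop p = [] := by
          apply List.eq_nil_of_length_eq_zero; rw [ht, hm, Nat.mul_zero]
        rw [this]; simp
      · have hpt : p ≤ (s.drop p).length := by rw [ht]; nlinarith [Nat.one_le_iff_ne_zero.mpr hm]
        rw [List.rotate_eq_drop_append_take hpt]
        have h1 : (s.drop p).take p = s.take p := by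
          have := congrArg (List.take p) hcomm
          rwa [List.take_append_of_le_length hpt, List.take_left' hw] at this
        have h2 : (s.drop p).drop p ++ s.take p = s.drop p := by
          have := congrArg (List.drop p) hcomm
          rwa [List.drop_append_of_le_length hpt, List.drop_left' hw] at this
        rw [h1, h2]
    have htp : s.drop p = (List.replicate m ((s.drop p).take p)).flatten := ih (s.drop p) ht hrt
    by_cases hm : m = 0
    · subst hm
      have ht0 : s.drop p = [] := by
        apply List.eq_nil_of_length_eq_zero; rw [ht, Nat.mul_zero]
      rw [List.replicate_succ, List.replicate_zero, List.flatten_cons, List.flatten_nil,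
        List.append_nil, ← hsplit, ht0]
      simp [List.take_take]
    · have hpt : p ≤ (s.drop p).length := by rw [ht]; nlinarith [Nat.one_le_iff_ne_zero.mpr hm]
      have h1 : (s.drop p).take p = s.take p := by
        have := congrArg (List.take p) hcomm
        rwa [List.take_append_of_le_length hpt, List.take_left' hw] at this
      have htp' : s.drop p = (List.replicate m (s.take p)).flatten := by rw [htp, h1]
      rw [List.replicate_succ, List.flatten_cons, ← htp', hsplit]

-- the two characterisations agree (the periodicity theorem)
theorem period_iff_rotate (s : List Char) (hs : s ≠ []) :
    (∃ q m : ℕ, 0 < q ∧ 2 ≤ m ∧ s.length = q * m ∧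
        s = (List.replicate m (s.take q)).flatten) ↔
      (∃ k : ℕ, 1 ≤ k ∧ k < s.length ∧ s.rotate k = s) := by
  have hl : 1 ≤ s.length := List.length_pos_iff.mpr hs
  constructor
  · rintro ⟨q, m, hq, hm, hlen, hrep⟩
    obtain ⟨m', rfl⟩ : ∃ m', m = m' + 1 := ⟨m - 1, by omega⟩
    have hql : q ≤ s.length := by nlinarith
    have hw : (s.take q).length = q := by simp; omega
    have hcons : s = s.take q ++ (List.replicate m' (s.take q)).flatten := by
      conv_lhs => rw [hrep]
      rw [List.replicate_succ, List.flatten_cons]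
    have hdropq : s.drop q = (List.replicate m' (s.take q)).flatten := by
      conv_lhs => rw [hcons]
      rw [List.drop_left' hw]
    refine ⟨q, hq, by nlinarith, ?_⟩
    rw [List.rotate_eq_drop_append_take hql, hdropq]
    have hflat : (List.replicate m' (s.take q)).flatten ++ s.take q
        = (List.replicate (m' + 1) (s.take q)).flatten := by
      rw [List.replicate_succ', List.flatten_append]
      simp
    rw [hflat, ← hrep]
  · rintro ⟨k, hk1, hkl, hrot⟩
    have hgpos : 0 < Nat.gcd k s.length := Nat.gcd_pos_of_pos_left _ (by omega)
    have hgk : Nat.gcd k s.length ≤ k := Nat.gcd_le_left _ (by omega)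
    have hgl : Nat.gcd k s.length < s.length := by omega
    obtain ⟨a, -, ha⟩ := Nat.exists_mul_mod_eq_gcd (k := s.length) (n := k) hgl
    have hrotg : s.rotate (Nat.gcd k s.length) = s := by
      rw [← ha, List.rotate_mod, mul_comm k a]
      exact rotate_mul_eq_self hrot a
    have hdvd : Nat.gcd k s.length ∣ s.length := Nat.gcd_dvd_right _ _
    have hlm : s.length = Nat.gcd k s.length * (s.length / Nat.gcd k s.length) :=
      (Nat.mul_div_cancel' hdvd).symm
    have hm2 : 2 ≤ s.length / Nat.gcd k s.length := by
      by_contra hcon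
      have hd1 : s.length / Nat.gcd k s.length ≤ 1 := by omega
      have hmul := Nat.mul_le_mul_left (Nat.gcd k s.length) hd1
      rw [Nat.mul_one] at hmul
      linarith [hlm, hgl, hmul]
    exact ⟨Nat.gcd k s.length, s.length / Nat.gcd k s.length, hgpos, hm2, hlm,
      periodic_of_rotate _ _ s hlm hrotg⟩

-- ===== VERDICT (by name: the statement is the Claim_ definition above) =====
theorem invalid_two_spec : Claim_equal_invalid_two := by
  intro n _
  unfold Spec_invalid_two
  have key : ∀ s : List Char, s ≠ [] →
      invalidTwoLoop s (PySem.Chars.len s)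
        (PySem.List.pyRange 1 (PySem.Int.floordiv (PySem.Chars.len s) 2 + 1) 1) =
      PySem.Chars.isIn s (PySem.List.slice (s ++ s) (some 1) (some (-1))) := by
    intro s hs
    have hlen : PySem.Chars.len s = (s.length : Int) := by simp [PySem.Chars.len]
    rw [hlen, Bool.eq_iff_iff, portA_iff s hs, portB_iff s hs]
    exact period_iff_rotate s hs
  exact key (PySem.Int.toChars n) (toChars_ne_nil n)
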